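-- pv_equiv track=rewrite | github.com/nishi10mo/AtCoder | practice/AtCoder Beginner Contest/ABC300/B.py | f
-- ===== SOURCE A (Python) =====
-- import copy
--
-- def f(H, W, A, B):
--     def vertical_shift(graph):
--         graph.append(graph[0])
--         del graph[0]
--         return graph
--     def horizontal_shift(graph):
--         n = len(graph)
--         for i in range(n):
--             graph[i].append(graph[i][0])
--             del graph[i][0]
--         return graph
--     for s in range(H):
--         for t in range(W):
--             graph = copy.deepcopy(A)
--             for _ in range(s):
--                 graph = vertical_shift(graph)
--             for _ in range(t):
--                 graph = horizontal_shift(graph)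
--             if graph == B:
--                 return "Yes"
--     return "No"
-- ===== SOURCE B (Python) =====
-- def f(H, W, A, B):
--     # Compute each candidate rotation directly by slicing instead of
--     # repeatedly single-step shifting a deep copy.
--     def rot(lst, k):
--         k %= len(lst)
--         return lst[k:] + lst[:k]
--     for s in range(H):
--         rows = rot(A, s)
--         for t in range(W):
--             if [rot(r, t) for r in rows] == B:
--                 return "Yes"
--     return "No"
-- ===== Notes on version B (the rewrite author's own statement) =====
-- stated objective: faster
-- what changed: Instead of deep-copying A and applying s single-step vertical and t single-step horizontal shifts for every candidate pair (s,t), B builds each candidate grid directly as a modular slice rotation of the rows and of each row.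
-- outside the precondition, e.g. on f(1, 1, [], []): A returns 'Yes', B raises ZeroDivisionError; on f(2, 1, [[]], [[]]): A returns 'Yes', B raises ZeroDivisionError
import Mathlib
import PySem

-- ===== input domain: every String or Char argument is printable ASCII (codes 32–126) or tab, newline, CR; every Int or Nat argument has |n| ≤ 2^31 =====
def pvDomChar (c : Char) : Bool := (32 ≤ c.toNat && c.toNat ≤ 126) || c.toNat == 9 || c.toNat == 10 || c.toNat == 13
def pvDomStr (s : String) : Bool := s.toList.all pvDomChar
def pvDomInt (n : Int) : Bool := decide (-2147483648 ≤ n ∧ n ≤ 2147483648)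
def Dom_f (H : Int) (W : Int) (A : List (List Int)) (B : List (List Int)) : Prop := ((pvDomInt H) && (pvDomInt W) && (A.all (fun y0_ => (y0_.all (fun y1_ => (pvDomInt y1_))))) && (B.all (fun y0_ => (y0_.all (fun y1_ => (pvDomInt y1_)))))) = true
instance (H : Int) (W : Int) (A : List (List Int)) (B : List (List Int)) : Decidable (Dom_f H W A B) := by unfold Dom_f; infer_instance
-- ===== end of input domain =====

-- B computes each candidate rotation directly with modular slicing instead of A's repeated
-- single-step shifting of a deep copy (objective: faster, by avoiding the per-candidate
-- shift iterations); equivalence is about the return value (A deep-copies before shifting,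
-- so neither mutates its arguments observably).

-- ===== PORT A =====
-- vertical_shift: graph.append(graph[0]); del graph[0].  On [] Python raises IndexError
-- (graph[0]); that input is excluded by Pre_f, the port returns [] there.
def pvVShift : List (List Int) → List (List Int)
  | [] => []
  | x :: xs => xs ++ [x]

-- one step of horizontal_shift on one row; on an empty row Python raises IndexError
-- (graph[i][0]); excluded by Pre_f, the port returns [] there.
def pvHRow : List Int → List Int
  | [] => []
  | x :: xs => xs ++ [x]

-- horizontal_shift: the for-loop rotates every row in place, i.e. maps pvHRow over the rows
def pvHShift (g : List (List Int)) : List (List Int) := g.map pvHRow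

-- the nested loops with early return "Yes" / final "No"
def f (H : Int) (W : Int) (A : List (List Int)) (B : List (List Int)) : String :=
  if (PySem.List.pyRange 0 H 1).any (fun s =>
       (PySem.List.pyRange 0 W 1).any (fun t =>
         pvHShift^[t.toNat] (pvVShift^[s.toNat] A) == B))
  then "Yes" else "No"

-- ===== PORT B =====
-- rot(lst, k): k %= len(lst); return lst[k:] + lst[:k]   (Python raises ZeroDivisionError
-- on an empty lst; excluded by Pre_f)
def pvRot {α : Type} (lst : List α) (k : Int) : List α :=
  PySem.List.slice lst (some (PySem.Int.mod k (lst.length : Int))) none ++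
    PySem.List.slice lst none (some (PySem.Int.mod k (lst.length : Int)))

def f_alt (H : Int) (W : Int) (A : List (List Int)) (B : List (List Int)) : String :=
  if (PySem.List.pyRange 0 H 1).any (fun s =>
       let rows := pvRot A s
       (PySem.List.pyRange 0 W 1).any (fun t =>
         rows.map (fun r => pvRot r t) == B))
  then "Yes" else "No"

-- ===== PRECONDITION & SPEC =====
-- Pre_f excludes empty grids and grids containing an empty row (when the loops actually run):
-- there Python A raises IndexError on the first attempted shift — or, when an early
-- comparison happens to match first, returns "Yes" where B's rot raises ZeroDivisionError.
def Pre_f (H : Int) (W : Int) (A : List (List Int)) (B : List (List Int)) : Prop :=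
  H ≤ 0 ∨ (A ≠ [] ∧ (W ≤ 0 ∨ ∀ r ∈ A, r ≠ []))
instance (H : Int) (W : Int) (A : List (List Int)) (B : List (List Int)) : Decidable (Pre_f H W A B) := by unfold Pre_f; infer_instance

def pvWitness_f : Int × Int × List (List Int) × List (List Int) :=
  (2, 2, [[1, 2], [3, 4]], [[4, 3], [2, 1]])

def Spec_f (H : Int) (W : Int) (A : List (List Int)) (B : List (List Int)) (out : String) : Prop := out = f_alt H W A B
instance (H : Int) (W : Int) (A : List (List Int)) (B : List (List Int)) (out : String) : Decidable (Spec_f H W A B out) := by unfold Spec_f; infer_instance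

-- ===== CLAIM (what is proved, stated in full; the proofs are below) =====
def Claim_equal_f : Prop := ∀ (H : Int) (W : Int) (A : List (List Int)) (B : List (List Int)), Dom_f H W A B → Pre_f H W A B → Spec_f H W A B (f H W A B)

-- ===== LEMMAS AND PROOFS =====

-- a single step "append head, delete head" is rotate-by-one
theorem pvShift1_eq_rotate {α : Type} (g : List α → List α) (hnil : g [] = [])
    (hcons : ∀ x xs, g (x :: xs) = xs ++ [x]) (l : List α) : g l = l.rotate 1 := by
  cases l with
  | nil => simpa using hnil
  | cons x xs => simp [hcons, List.rotate_cons_succ]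

-- iterating the step n times is rotate-by-n
theorem pvShiftIter_eq_rotate {α : Type} (g : List α → List α) (hnil : g [] = [])
    (hcons : ∀ x xs, g (x :: xs) = xs ++ [x]) (n : Nat) (l : List α) :
    g^[n] l = l.rotate n := by
  induction n with
  | zero => simp
  | succ n ih =>
    rw [Function.iterate_succ_apply', ih, pvShift1_eq_rotate g hnil hcons,
      List.rotate_rotate]

-- slicing rotation equals List.rotate for a nonnegative count (any list: % by 0 gives 0)
theorem pvRot_eq_rotate {α : Type} (l : List α) (k : Int) (hk : 0 ≤ k) :
    pvRot l k = l.rotate k.toNat := by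
  by_cases hL : l = []
  · subst hL; simp [pvRot, PySem.Int.mod, PySem.List.slice]
  · have hposn : 0 < l.length := List.length_pos_iff.mpr hL
    have hpos : (0 : Int) < (l.length : Int) := by exact_mod_cast hposn
    have hmod : PySem.Int.mod k (l.length : Int) = ((k.toNat % l.length : Nat) : Int) := by
      rw [PySem.Int.mod_eq_emod_of_pos hpos, Int.natCast_mod, Int.toNat_of_nonneg hk]
    have hle : k.toNat % l.length ≤ l.length := Nat.le_of_lt (Nat.mod_lt _ hposn)
    rw [pvRot, hmod, PySem.List.slice_from_natCast, PySem.List.slice_to_natCast,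
      ← List.rotate_eq_drop_append_take hle, List.rotate_mod]

-- iterated horizontal shift maps the iterated row step over the rows
theorem pvHShift_iterate (n : Nat) (g : List (List Int)) :
    pvHShift^[n] g = g.map (pvHRow^[n]) := by
  induction n generalizing g with
  | zero => simp
  | succ n ih =>
    rw [Function.iterate_succ_apply, ih]
    simp [pvHShift]

theorem pvAny_congr {α : Type} (p q : α → Bool) (l : List α) (h : ∀ x ∈ l, p x = q x) :
    l.any p = l.any q := by
  induction l with
  | nil => rfl
  | cons x xs ih => simp_all [List.any_cons]

-- the two per-shift candidate grids coincide
theorem pvGrid_eq (A : List (List Int)) (s t : Int) (hs : 0 ≤ s) (ht : 0 ≤ t) :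
    pvHShift^[t.toNat] (pvVShift^[s.toNat] A) = (pvRot A s).map (fun r => pvRot r t) := by
  rw [pvShiftIter_eq_rotate pvVShift rfl (fun _ _ => rfl), pvHShift_iterate,
    pvRot_eq_rotate A s hs]
  apply List.map_congr_left
  intro r _
  rw [pvShiftIter_eq_rotate pvHRow rfl (fun _ _ => rfl), pvRot_eq_rotate r t ht]

-- ===== VERDICT (by name: the statement is the Claim_ definition above) =====
theorem f_spec : Claim_equal_f := by
  intro H W A B _ _
  unfold Spec_f f f_alt
  have h : (PySem.List.pyRange 0 H 1).any (fun s =>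
        (PySem.List.pyRange 0 W 1).any (fun t =>
          pvHShift^[t.toNat] (pvVShift^[s.toNat] A) == B))
      = (PySem.List.pyRange 0 H 1).any (fun s =>
        (PySem.List.pyRange 0 W 1).any (fun t =>
          (pvRot A s).map (fun r => pvRot r t) == B)) := by
    apply pvAny_congr
    intro s hs
    have hs0 : 0 ≤ s := ((PySem.List.mem_pyRange_one).mp hs).1
    apply pvAny_congr
    intro t ht
    have ht0 : 0 ≤ t := ((PySem.List.mem_pyRange_one).mp ht).1
    rw [pvGrid_eq A s t hs0 ht0]
  rw [h]
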